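-- pv_equiv track=rewrite | github.com/thecrimsoncoder/pyDijkstra | pyDijkstra.py | buildEndingNodesList
-- ===== SOURCE A (Python) =====
-- from collections import defaultdict
--
-- def buildEndingNodesList(edges):
--     endingNodesDict = defaultdict(list)
--     for startingNode, endingNode, linkCost in edges:
--         endingNodesDict[endingNode].append(linkCost)
--
--     endingNodes = list()
--     for nodes in endingNodesDict:
--         endingNodes.append(nodes[0])
--
--     return endingNodes
-- ===== SOURCE B (Python) =====
-- def buildEndingNodesList(edges):
--     result = []
--     pending = list(edges)
--     while pending:
--         node = pending[0][1]
--         result.append(node[0])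
--         pending = [e for e in pending[1:] if e[1] != node]
--     return result
-- ===== Notes on version B (the rewrite author's own statement) =====
-- stated objective: alternative
-- what changed: Replaces A's defaultdict build plus key-iteration with an iterative filter-based worklist: take the first pending edge's ending node, emit its first character, and filter all edges with that ending node out of the worklist; no dict or set is maintained.
-- outside the precondition, e.g. on buildEndingNodesList([('a', '', 1)]): A raises IndexError, B raises IndexError
import Mathlib
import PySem

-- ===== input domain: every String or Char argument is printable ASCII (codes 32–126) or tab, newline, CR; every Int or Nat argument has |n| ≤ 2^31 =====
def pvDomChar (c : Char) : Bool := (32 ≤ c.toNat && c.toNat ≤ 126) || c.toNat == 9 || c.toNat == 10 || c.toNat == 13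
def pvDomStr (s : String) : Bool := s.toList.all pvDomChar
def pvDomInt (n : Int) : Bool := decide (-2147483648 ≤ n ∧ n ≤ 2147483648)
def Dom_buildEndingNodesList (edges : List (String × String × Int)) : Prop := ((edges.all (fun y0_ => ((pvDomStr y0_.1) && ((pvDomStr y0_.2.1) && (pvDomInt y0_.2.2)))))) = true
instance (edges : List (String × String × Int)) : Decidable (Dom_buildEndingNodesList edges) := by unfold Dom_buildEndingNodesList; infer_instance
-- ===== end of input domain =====

-- B replaces A's defaultdict build + key iteration with a filter-based worklist
-- (take first pending ending node, emit its first char, filter it out): alternative decomposition.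

-- s[0] as a one-character string (IndexError on "" is excluded by Pre_)
def pvFirst (s : String) : String :=
  match PySem.Str.pyGet? s 0 with
  | some c => String.ofList [c]
  | none => ""

-- ===== PORT A =====
def buildEndingNodesList (edges : List (String × String × Int)) : List String :=
  ((edges.foldl (fun d e => d.modify e.2.1 [] (fun l => l ++ [e.2.2]))
      (PySem.Dict.empty : PySem.Dict String (List Int))).keys).foldl
    (fun acc nodes => acc ++ [pvFirst nodes]) []

-- ===== PORT B =====
-- the while loop: state = (result, pending)
def pvBLoop (result : List String) (pending : List (String × String × Int)) : List String :=
  match pending with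
  | [] => result
  | e :: rest =>
      pvBLoop (result ++ [pvFirst e.2.1]) (rest.filter (fun x => x.2.1 ≠ e.2.1))
termination_by pending.length
decreasing_by
  simp only [List.length_unattach]
  exact Nat.lt_succ_of_le (le_trans (List.length_filter_le _ rest.attach) (by simp))

def buildEndingNodesList_alt (edges : List (String × String × Int)) : List String :=
  pvBLoop [] edges

-- ===== PRECONDITION & SPEC =====
-- Pre_ excludes edges whose ending node is the empty string: there nodes[0] raises IndexError in A (and B raises too).
def Pre_buildEndingNodesList (edges : List (String × String × Int)) : Prop :=
  ∀ e ∈ edges, e.2.1 ≠ ""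
instance (edges : List (String × String × Int)) : Decidable (Pre_buildEndingNodesList edges) := by
  unfold Pre_buildEndingNodesList; infer_instance

def pvWitness_buildEndingNodesList : (List (String × String × Int)) :=
  [("a", "b", 1), ("a", "c", 2), ("d", "b", 3)]

def Spec_buildEndingNodesList (edges : List (String × String × Int)) (out : List String) : Prop := out = buildEndingNodesList_alt edges
instance (edges : List (String × String × Int)) (out : List String) : Decidable (Spec_buildEndingNodesList edges out) := by unfold Spec_buildEndingNodesList; infer_instance

-- ===== CLAIM =====
def Claim_equal_buildEndingNodesList : Prop := ∀ (edges : List (String × String × Int)), Dom_buildEndingNodesList edges → Pre_buildEndingNodesList edges → Spec_buildEndingNodesList edges (buildEndingNodesList edges)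

-- ===== LEMMAS AND PROOFS =====

-- updating a set with edges already-seen ending nodes filtered out changes nothing
theorem pvUpdate_filter_absorb (rest : List (String × String × Int)) (s : PySem.Set String)
    (n : String) (hn : n ∈ s) :
    PySem.Set.update s ((rest.filter (fun x => x.2.1 ≠ n)).map (fun e => e.2.1))
      = PySem.Set.update s (rest.map (fun e => e.2.1)) := by
  induction rest generalizing s with
  | nil => rfl
  | cons e rest ih =>
    by_cases he : e.2.1 = n
    · have hadd : PySem.Set.add s e.2.1 = s := PySem.Set.add_of_mem (he ▸ hn)
      rw [List.filter_cons, if_neg (by simp [he])]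
      rw [show PySem.Set.update s ((e :: rest).map (fun e => e.2.1))
            = PySem.Set.update (PySem.Set.add s e.2.1) (rest.map (fun e => e.2.1)) from rfl, hadd]
      exact ih s hn
    · rw [List.filter_cons, if_pos (by simp [he])]
      rw [show PySem.Set.update s ((e :: rest).map (fun e => e.2.1))
            = PySem.Set.update (PySem.Set.add s e.2.1) (rest.map (fun e => e.2.1)) from rfl]
      rw [List.map_cons,
          show PySem.Set.update s (e.2.1 :: (rest.filter (fun x => x.2.1 ≠ n)).map (fun e => e.2.1))
            = PySem.Set.update (PySem.Set.add s e.2.1) ((rest.filter (fun x => x.2.1 ≠ n)).map (fun e => e.2.1)) from rfl]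
      have hn' : n ∈ PySem.Set.add s e.2.1 := by
        by_cases hc : PySem.Set.contains s e.2.1
        · rw [PySem.Set.add_of_mem ((PySem.Set.contains_iff s e.2.1).mp hc)]; exact hn
        · rw [PySem.Set.add_of_not_mem (fun hm => hc ((PySem.Set.contains_iff s e.2.1).mpr hm))]
          exact List.mem_append_left _ hn
      exact ih (PySem.Set.add s e.2.1) hn'

-- B's worklist invariant: if no pending ending node is already in s,
-- the loop started at s.map pvFirst produces the update of s by all ending nodes, mapped.
theorem pvBLoop_eq (pending : List (String × String × Int)) (s : PySem.Set String)
    (h : ∀ e ∈ pending, e.2.1 ∉ s) :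
    pvBLoop (s.map pvFirst) pending
      = (PySem.Set.update s (pending.map (fun e => e.2.1))).map pvFirst := by
  induction hn : pending.length using Nat.strong_induction_on generalizing pending s with
  | _ n ih =>
    match pending with
    | [] => simp [pvBLoop, PySem.Set.update]
    | e :: rest =>
      subst hn
      have hne : e.2.1 ∉ s := h e (List.mem_cons_self ..)
      have hadd : PySem.Set.add s e.2.1 = s ++ [e.2.1] :=
        PySem.Set.add_of_not_mem hne
      rw [show pvBLoop (s.map pvFirst) (e :: rest)
            = pvBLoop (s.map pvFirst ++ [pvFirst e.2.1]) (rest.filter (fun x => x.2.1 ≠ e.2.1))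
          from by rw [pvBLoop.eq_def]]
      have hmap : s.map pvFirst ++ [pvFirst e.2.1] = (PySem.Set.add s e.2.1).map pvFirst := by
        simp [hadd]
      rw [hmap]
      have hlen : (rest.filter (fun x => x.2.1 ≠ e.2.1)).length < (e :: rest).length :=
        Nat.lt_succ_of_le (List.length_filter_le _ rest)
      have hne2 : ∀ e2 ∈ (e :: rest), e2.2.1 ∉ s := h
      have hsub : ∀ x ∈ rest.filter (fun x => x.2.1 ≠ e.2.1), x.2.1 ∉ PySem.Set.add s e.2.1 := by
        intro x hx
        have hx' := List.mem_of_mem_filter hx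
        have hxe : x.2.1 ≠ e.2.1 := by
          have := List.of_mem_filter hx; simpa using this
        rw [hadd]
        intro hmem
        rcases List.mem_append.mp hmem with hmem | hmem
        · exact h x (List.mem_cons_of_mem _ hx') hmem
        · exact hxe (by simpa using hmem)
      rw [ih _ hlen _ (PySem.Set.add s e.2.1) hsub rfl]
      have hmem' : e.2.1 ∈ PySem.Set.add s e.2.1 := by
        rw [hadd]; exact List.mem_append_right _ (by simp)
      rw [pvUpdate_filter_absorb rest (PySem.Set.add s e.2.1) e.2.1 hmem']
      rfl

-- ===== VERDICT =====
theorem buildEndingNodesList_spec : Claim_equal_buildEndingNodesList := by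
  intro edges _ _
  unfold Spec_buildEndingNodesList buildEndingNodesList buildEndingNodesList_alt
  have hB : pvBLoop [] edges
      = (PySem.Set.update PySem.Set.empty (edges.map (fun e => e.2.1))).map pvFirst := by
    have := pvBLoop_eq edges PySem.Set.empty (by intro e _ hmem; simp [PySem.Set.empty] at hmem)
    simpa [PySem.Set.empty] using this
  rw [hB, PySem.Dict.keys_foldl_modify_key, PySem.List.foldl_append_singleton_eq_map]
  simp [PySem.Dict.keys, PySem.Dict.empty]
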